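-- pv_equiv track=rewrite | github.com/ninjra/statistics_harness | plugins/analysis_dynamic_close_detection/plugin.py | _candidate_columns
-- ===== SOURCE A (Python) =====
-- def _candidate_columns(
--     preferred: str | None,
--     columns: list[str],
--     role_by_name: dict[str, str],
--     roles: set[str],
--     patterns: list[str],
--     lower_names: dict[str, str],
-- ) -> list[str]:
--     seen: set[str] = set()
--     candidates: list[str] = []
--     if preferred and preferred in columns:
--         candidates.append(preferred)
--         seen.add(preferred)
--     for col in columns:
--         if role_by_name.get(col) in roles and col not in seen:
--             candidates.append(col)
--             seen.add(col)
--     for col in columns: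
--         if col in seen:
--             continue
--         name = lower_names[col]
--         if any(pattern in name for pattern in patterns):
--             candidates.append(col)
--             seen.add(col)
--     return candidates
-- ===== SOURCE B (Python) =====
-- def _candidate_columns(
--     preferred,
--     columns,
--     role_by_name,
--     roles,
--     patterns,
--     lower_names,
-- ):
--     seen = set()
--     pref_bucket = []
--     role_bucket = []
--     pattern_bucket = []
--     for col in columns:
--         if col in seen:
--             continue
--         seen.add(col)
--         if preferred and col == preferred:
--             pref_bucket.append(col)
--         elif role_by_name.get(col) in roles:
--             role_bucket.append(col)
--         else:
--             name = lower_names[col]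
--             if any(pattern in name for pattern in patterns):
--                 pattern_bucket.append(col)
--     return pref_bucket + role_bucket + pattern_bucket
-- ===== Notes on version B (the rewrite author's own statement) =====
-- stated objective: simpler
-- what changed: Replaces A's preferred check plus two full passes over columns (each threading a shared seen set) with a single first-occurrence pass that classifies each column into one of three buckets (preferred / role match / pattern match) and concatenates the buckets.
import Mathlib
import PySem

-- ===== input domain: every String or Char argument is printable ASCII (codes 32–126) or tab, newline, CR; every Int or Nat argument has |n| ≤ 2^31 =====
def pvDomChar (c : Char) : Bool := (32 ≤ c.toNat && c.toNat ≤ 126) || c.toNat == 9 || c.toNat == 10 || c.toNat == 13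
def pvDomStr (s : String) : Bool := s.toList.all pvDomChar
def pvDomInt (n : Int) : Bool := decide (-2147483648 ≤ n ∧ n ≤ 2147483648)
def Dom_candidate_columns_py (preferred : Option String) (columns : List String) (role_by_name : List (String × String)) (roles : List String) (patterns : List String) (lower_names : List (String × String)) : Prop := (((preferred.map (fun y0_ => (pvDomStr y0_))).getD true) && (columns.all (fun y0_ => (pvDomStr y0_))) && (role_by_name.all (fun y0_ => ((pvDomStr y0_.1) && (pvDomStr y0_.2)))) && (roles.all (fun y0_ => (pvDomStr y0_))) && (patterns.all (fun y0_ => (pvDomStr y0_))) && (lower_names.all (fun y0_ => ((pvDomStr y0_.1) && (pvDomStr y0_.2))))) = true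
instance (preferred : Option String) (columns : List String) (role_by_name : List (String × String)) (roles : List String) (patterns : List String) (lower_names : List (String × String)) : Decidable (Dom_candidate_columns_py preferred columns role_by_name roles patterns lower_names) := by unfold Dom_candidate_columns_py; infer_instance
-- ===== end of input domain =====

-- B replaces A's preferred check plus two further full passes over `columns` (sharing one
-- seen-set) by a single first-occurrence pass that classifies each new column into one of
-- three buckets (preferred / role match / pattern match) and concatenates the buckets
-- (objective: simpler, same asymptotic cost).

-- shared helpers, each a single Python expression both sources contain:
-- `role_by_name.get(col) in roles` (None is never an element of a set of strings)
def pvRoleHit (role_by_name : List (String × String)) (roles : List String) (col : String) : Bool :=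
  match PySem.Dict.get? (PySem.Dict.mk role_by_name) col with
  | some r => roles.contains r
  | none => false

-- `preferred and col == preferred`
def pvPrefHit (preferred : Option String) (col : String) : Bool :=
  match preferred with
  | some p => p != "" && col == p
  | none => false

-- `name = lower_names[col]; any(pattern in name for pattern in patterns)`
-- lower_names[col] is ported as getD with default "": exact whenever the key is present,
-- which Pre_ guarantees for every column that reaches this lookup.
def pvPatHit (lower_names : List (String × String)) (patterns : List String) (col : String) : Bool :=
  let name := PySem.Dict.getD (PySem.Dict.mk lower_names) col ""
  patterns.any (fun pat => PySem.Str.isIn pat name)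

-- ===== PORT A =====
def candidate_columns_py (preferred : Option String) (columns : List String) (role_by_name : List (String × String)) (roles : List String) (patterns : List String) (lower_names : List (String × String)) : List String :=
  -- seen = set(); candidates = []; if preferred and preferred in columns: append + add
  let st0 : PySem.Set String × List String :=
    match preferred with
    | none => (PySem.Set.empty, [])
    | some p =>
      if p != "" && columns.contains p
      then (PySem.Set.add PySem.Set.empty p, [p])
      else (PySem.Set.empty, [])
  -- first loop: role matches not yet seen
  let st1 := columns.foldl
    (fun (st : PySem.Set String × List String) col =>
      if pvRoleHit role_by_name roles col && !(PySem.Set.contains st.1 col)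
      then (PySem.Set.add st.1 col, st.2 ++ [col]) else st) st0
  -- second loop: skip seen, then pattern matches
  let st2 := columns.foldl
    (fun (st : PySem.Set String × List String) col =>
      if PySem.Set.contains st.1 col then st
      else if pvPatHit lower_names patterns col
      then (PySem.Set.add st.1 col, st.2 ++ [col]) else st) st1
  st2.2

-- ===== PORT B =====
def candidate_columns_py_alt (preferred : Option String) (columns : List String) (role_by_name : List (String × String)) (roles : List String) (patterns : List String) (lower_names : List (String × String)) : List String :=
  -- one pass: skip columns already seen, classify each fresh column into a bucket
  let st := columns.foldl
    (fun (st : PySem.Set String × List String × List String × List String) col =>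
      if PySem.Set.contains st.1 col then st
      else if pvPrefHit preferred col
      then (PySem.Set.add st.1 col, st.2.1 ++ [col], st.2.2.1, st.2.2.2)
      else if pvRoleHit role_by_name roles col
      then (PySem.Set.add st.1 col, st.2.1, st.2.2.1 ++ [col], st.2.2.2)
      else if pvPatHit lower_names patterns col
      then (PySem.Set.add st.1 col, st.2.1, st.2.2.1, st.2.2.2 ++ [col])
      else (PySem.Set.add st.1 col, st.2.1, st.2.2.1, st.2.2.2))
    (PySem.Set.empty, [], [], [])
  st.2.1 ++ st.2.2.1 ++ st.2.2.2

-- ===== PRECONDITION & SPEC =====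
-- Pre_ excludes exactly the inputs on which A raises KeyError: some column that is neither
-- the kept truthy preferred nor a role match is missing from lower_names (B raises there too).
def Pre_candidate_columns_py (preferred : Option String) (columns : List String) (role_by_name : List (String × String)) (roles : List String) (patterns : List String) (lower_names : List (String × String)) : Prop :=
  ∀ col ∈ columns,
    (PySem.Dict.contains (PySem.Dict.mk lower_names) col = true)
    ∨ pvRoleHit role_by_name roles col = true
    ∨ pvPrefHit preferred col = true
instance (preferred : Option String) (columns : List String) (role_by_name : List (String × String)) (roles : List String) (patterns : List String) (lower_names : List (String × String)) : Decidable (Pre_candidate_columns_py preferred columns role_by_name roles patterns lower_names) := by unfold Pre_candidate_columns_py; infer_instance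

def pvWitness_candidate_columns_py : Option String × List String × (List (String × String)) × List String × List String × (List (String × String)) :=
  (some "ts", ["ts", "val", "note"], [("val", "value")], ["value"], ["ts"], [("note", "note")])

def Spec_candidate_columns_py (preferred : Option String) (columns : List String) (role_by_name : List (String × String)) (roles : List String) (patterns : List String) (lower_names : List (String × String)) (out : List String) : Prop := out = candidate_columns_py_alt preferred columns role_by_name roles patterns lower_names
instance (preferred : Option String) (columns : List String) (role_by_name : List (String × String)) (roles : List String) (patterns : List String) (lower_names : List (String × String)) (out : List String) : Decidable (Spec_candidate_columns_py preferred columns role_by_name roles patterns lower_names out) := by unfold Spec_candidate_columns_py; infer_instance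

-- ===== CLAIM (what is proved, stated in full; the proofs are below) =====
def Claim_equal_candidate_columns_py : Prop := ∀ (preferred : Option String) (columns : List String) (role_by_name : List (String × String)) (roles : List String) (patterns : List String) (lower_names : List (String × String)), Dom_candidate_columns_py preferred columns role_by_name roles patterns lower_names → Pre_candidate_columns_py preferred columns role_by_name roles patterns lower_names → Spec_candidate_columns_py preferred columns role_by_name roles patterns lower_names (candidate_columns_py preferred columns role_by_name roles patterns lower_names)

-- ===== LEMMAS AND PROOFS =====

-- seen sets abstracted as membership functions String → Bool
def pvIns (c : String) (s : String → Bool) : String → Bool := fun x => x == c || s x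

-- first-occurrence dedup of a list, excluding elements already in s
def pvFD (s : String → Bool) : List String → List String
  | [] => []
  | c :: cs => if s c then pvFD s cs else c :: pvFD (pvIns c s) cs

theorem contains_pvAdd (s : PySem.Set String) (c x : String) :
    (PySem.Set.add s c).contains x = (x == c || s.contains x) := by
  simp [PySem.Set.add_eq_ite]
  by_cases h : c ∈ s <;> by_cases h2 : x = c <;> simp [h, h2]

theorem pvFD_congr (cs : List String) (s s' : String → Bool)
    (h : ∀ x ∈ cs, s x = s' x) : pvFD s cs = pvFD s' cs := by
  induction cs generalizing s s' with
  | nil => rfl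
  | cons c cs ih =>
    have hc := h c (by simp)
    simp only [pvFD, hc]
    split
    · exact ih s s' (fun x hx => h x (by simp [hx]))
    · exact congrArg _ (ih _ _ (fun x hx => by simp [pvIns, h x (by simp [hx])]))

theorem mem_pvFD (x : String) (cs : List String) (s : String → Bool) :
    x ∈ pvFD s cs ↔ x ∈ cs ∧ s x = false := by
  induction cs generalizing s with
  | nil => simp [pvFD]
  | cons c cs ih =>
    simp only [pvFD]
    split
    · rename_i hc
      rw [ih]
      constructor
      · rintro ⟨h1, h2⟩; exact ⟨by simp [h1], h2⟩
      · rintro ⟨h1, h2⟩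
        rcases List.mem_cons.mp h1 with h | h
        · subst h; simp [hc] at h2
        · exact ⟨h, h2⟩
    · rename_i hc
      simp only [List.mem_cons, ih, pvIns]
      constructor
      · rintro (h | ⟨h1, h2⟩)
        · subst h; simp_all [Bool.not_eq_true]
        · simp only [Bool.or_eq_false_iff] at h2; exact ⟨Or.inr h1, h2.2⟩
      · rintro ⟨h1 | h1, h2⟩
        · subst h1; simp_all [Bool.not_eq_true]
        · by_cases hx : x = c
          · subst hx; simp_all [Bool.not_eq_true]
          · exact Or.inr ⟨h1, by simp [hx, h2]⟩

theorem nodup_pvFD (cs : List String) (s : String → Bool) : (pvFD s cs).Nodup := by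
  induction cs generalizing s with
  | nil => simp [pvFD]
  | cons c cs ih =>
    simp only [pvFD]
    split
    · exact ih s
    · refine List.nodup_cons.mpr ⟨?_, ih _⟩
      intro hmem
      have := (mem_pvFD c cs (pvIns c s)).mp hmem
      simp [pvIns] at this

theorem filter_pvFD_or (h g : String → Bool) (cs : List String) (s : String → Bool) :
    (pvFD (fun x => s x || g x) cs).filter h
      = (pvFD s cs).filter (fun x => !g x && h x) := by
  induction cs generalizing s with
  | nil => rfl
  | cons c cs ih =>
    by_cases hs : s c = true
    · simp only [pvFD, hs, Bool.true_or, if_true, ih]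
    · have hs' : s c = false := by simp [hs]
      by_cases hg : g c = true
      · have hfun : (fun x => pvIns c s x || g x) = fun x => s x || g x := by
          funext x
          by_cases hx : x = c
          · subst hx; simp [pvIns, hg, hs']
          · have hxc : (x == c) = false := beq_eq_false_iff_ne.mpr hx
            simp [pvIns, hxc]
        simp only [pvFD, hs', hg, Bool.false_or, if_true, Bool.false_eq_true, if_false]
        rw [List.filter_cons_of_neg (by simp [hg]), ← ih (pvIns c s), hfun]
      · have hg' : g c = false := by simp [hg]
        have hfun : pvIns c (fun x => s x || g x) = fun x => pvIns c s x || g x := by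
          funext x; simp [pvIns, Bool.or_assoc]
        simp only [pvFD, hs', hg', Bool.or_self, if_false, Bool.false_eq_true]
        rw [List.filter_cons, List.filter_cons, hfun, ih]
        have hpc : (!g c && h c) = h c := by simp [hg']
        rw [hpc]

-- inserting an element the filter rejects does not change the filtered dedup
theorem pvFD_filter_ins (g : String → Bool) (c : String) (hg : g c = false)
    (sf : String → Bool) (cs : List String) :
    (pvFD (pvIns c sf) cs).filter g = (pvFD sf cs).filter g := by
  have h1 : pvIns c sf = fun x => sf x || (x == c) := by
    funext x; simp [pvIns, Bool.or_comm]
  rw [h1, filter_pvFD_or]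
  apply List.filter_congr
  intro x _
  by_cases hx : x = c
  · subst hx; simp [hg]
  · simp [hx]

-- A's role pass
def pvRoleFold (g : String → Bool) (cs : List String) (st0 : PySem.Set String × List String) :
    PySem.Set String × List String :=
  cs.foldl
    (fun (st : PySem.Set String × List String) col =>
      if g col && !(PySem.Set.contains st.1 col)
      then (PySem.Set.add st.1 col, st.2 ++ [col]) else st) st0

theorem pvRoleFold_spec (g : String → Bool) (cs : List String) :
    ∀ (s : PySem.Set String) (sf : String → Bool) (acc : List String),
    (∀ x, PySem.Set.contains s x = sf x) →
    (pvRoleFold g cs (s, acc)).2 = acc ++ (pvFD sf cs).filter g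
    ∧ ∀ x, PySem.Set.contains (pvRoleFold g cs (s, acc)).1 x
        = (sf x || (g x && cs.contains x)) := by
  induction cs with
  | nil =>
    intro s sf acc hs
    refine ⟨by simp [pvRoleFold, pvFD], fun x => by simpa [pvRoleFold] using hs x⟩
  | cons c cs ih =>
    intro s sf acc hs
    have hstep : pvRoleFold g (c :: cs) (s, acc)
        = pvRoleFold g cs (if g c && !(PySem.Set.contains s c)
            then (PySem.Set.add s c, acc ++ [c]) else (s, acc)) := rfl
    by_cases hg : g c = true
    · by_cases hsc : sf c = true
      · -- already seen: skipped
        have : (g c && !(PySem.Set.contains s c)) = false := by rw [hs c, hsc, hg]; rfl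
        rw [hstep, this]
        obtain ⟨h2, h1⟩ := ih s sf acc hs
        simp only [if_false, Bool.false_eq_true]
        refine ⟨by rw [h2]; simp [pvFD, hsc], fun x => ?_⟩
        rw [h1 x]
        by_cases hx : x = c
        · subst hx; simp [hsc]
        · simp [hx]
      · -- fresh match: pushed
        have hsc' : sf c = false := by simp [hsc]
        have : (g c && !(PySem.Set.contains s c)) = true := by rw [hs c, hsc', hg]; rfl
        rw [hstep, this]
        simp only [if_true]
        obtain ⟨h2, h1⟩ := ih (PySem.Set.add s c) (pvIns c sf) (acc ++ [c])
          (fun x => by rw [contains_pvAdd, hs x]; rfl)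
        refine ⟨?_, fun x => ?_⟩
        · rw [h2]
          simp only [pvFD, hsc', if_false, Bool.false_eq_true]
          rw [List.filter_cons_of_pos hg, List.append_assoc, List.singleton_append]
        · rw [h1 x]
          by_cases hx : x = c
          · subst hx; simp [pvIns, hg]
          · have hxc : (x == c) = false := beq_eq_false_iff_ne.mpr hx
            simp [pvIns, hxc, hx]
    · -- no role match: state unchanged
      have hg' : g c = false := by simp [hg]
      have : (g c && !(PySem.Set.contains s c)) = false := by rw [hg']; rfl
      rw [hstep, this]
      obtain ⟨h2, h1⟩ := ih s sf acc hs
      simp only [if_false, Bool.false_eq_true]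
      refine ⟨?_, fun x => ?_⟩
      · rw [h2]
        by_cases hsc : sf c = true
        · simp [pvFD, hsc]
        · have hsc' : sf c = false := by simp [hsc]
          simp only [pvFD, hsc', if_false, Bool.false_eq_true]
          rw [List.filter_cons_of_neg (by simp [hg']), pvFD_filter_ins g c hg']
      · rw [h1 x]
        by_cases hx : x = c
        · subst hx; simp [hg']
        · simp [hx]

-- A's pattern pass
def pvPatFold (g : String → Bool) (cs : List String) (st0 : PySem.Set String × List String) :
    PySem.Set String × List String :=
  cs.foldl
    (fun (st : PySem.Set String × List String) col =>
      if PySem.Set.contains st.1 col then st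
      else if g col
      then (PySem.Set.add st.1 col, st.2 ++ [col]) else st) st0

theorem pvPatFold_spec (g : String → Bool) (cs : List String) :
    ∀ (s : PySem.Set String) (sf : String → Bool) (acc : List String),
    (∀ x, PySem.Set.contains s x = sf x) →
    (pvPatFold g cs (s, acc)).2 = acc ++ (pvFD sf cs).filter g := by
  induction cs with
  | nil => intro s sf acc _; simp [pvPatFold, pvFD]
  | cons c cs ih =>
    intro s sf acc hs
    have hstep : pvPatFold g (c :: cs) (s, acc)
        = pvPatFold g cs (if PySem.Set.contains s c then (s, acc)
            else if g c then (PySem.Set.add s c, acc ++ [c]) else (s, acc)) := rfl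
    by_cases hsc : sf c = true
    · rw [hstep, hs c, hsc]
      simp only [if_true]
      rw [ih s sf acc hs]
      simp [pvFD, hsc]
    · have hsc' : sf c = false := by simp [hsc]
      rw [hstep, hs c, hsc']
      simp only [Bool.false_eq_true, if_false]
      by_cases hg : g c = true
      · rw [if_pos hg]
        rw [ih (PySem.Set.add s c) (pvIns c sf) (acc ++ [c])
          (fun x => by rw [contains_pvAdd, hs x]; rfl)]
        simp only [pvFD, hsc', if_false, Bool.false_eq_true]
        rw [List.filter_cons_of_pos hg, List.append_assoc, List.singleton_append]
      · have hg' : g c = false := by simp [hg]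
        rw [if_neg (by simp [hg']), ih s sf acc hs]
        simp only [pvFD, hsc', if_false, Bool.false_eq_true]
        rw [List.filter_cons_of_neg (by simp [hg']), pvFD_filter_ins g c hg']

-- B's single classifying pass
def pvBFold (q0 qr qp : String → Bool) (cs : List String)
    (st0 : PySem.Set String × List String × List String × List String) :
    PySem.Set String × List String × List String × List String :=
  cs.foldl
    (fun (st : PySem.Set String × List String × List String × List String) col =>
      if PySem.Set.contains st.1 col then st
      else if q0 col
      then (PySem.Set.add st.1 col, st.2.1 ++ [col], st.2.2.1, st.2.2.2)
      else if qr col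
      then (PySem.Set.add st.1 col, st.2.1, st.2.2.1 ++ [col], st.2.2.2)
      else if qp col
      then (PySem.Set.add st.1 col, st.2.1, st.2.2.1, st.2.2.2 ++ [col])
      else (PySem.Set.add st.1 col, st.2.1, st.2.2.1, st.2.2.2)) st0

theorem pvBFold_spec (q0 qr qp : String → Bool) (cs : List String) :
    ∀ (s : PySem.Set String) (sf : String → Bool) (b0 b1 b2 : List String),
    (∀ x, PySem.Set.contains s x = sf x) →
    (pvBFold q0 qr qp cs (s, b0, b1, b2)).2.1 = b0 ++ (pvFD sf cs).filter q0
    ∧ (pvBFold q0 qr qp cs (s, b0, b1, b2)).2.2.1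
        = b1 ++ (pvFD sf cs).filter (fun x => !q0 x && qr x)
    ∧ (pvBFold q0 qr qp cs (s, b0, b1, b2)).2.2.2
        = b2 ++ (pvFD sf cs).filter (fun x => !q0 x && (!qr x && qp x)) := by
  induction cs with
  | nil => intro s sf b0 b1 b2 _; simp [pvBFold, pvFD]
  | cons c cs ih =>
    intro s sf b0 b1 b2 hs
    by_cases hsc : sf c = true
    · have hstep : pvBFold q0 qr qp (c :: cs) (s, b0, b1, b2)
          = pvBFold q0 qr qp cs (s, b0, b1, b2) := by
        show pvBFold q0 qr qp cs (if PySem.Set.contains s c then _ else _) = _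
        rw [hs c, hsc]
        rfl
      rw [hstep]
      obtain ⟨h0, h1, h2⟩ := ih s sf b0 b1 b2 hs
      simp only [pvFD, hsc, if_true] at *
      exact ⟨h0, h1, h2⟩
    · have hsc' : sf c = false := by simp [hsc]
      have hins : ∀ x, PySem.Set.contains (PySem.Set.add s c) x = pvIns c sf x :=
        fun x => by rw [contains_pvAdd, hs x]; rfl
      have hfd : pvFD sf (c :: cs) = c :: pvFD (pvIns c sf) cs := by
        simp [pvFD, hsc']
      by_cases h0c : q0 c = true
      · have hstep : pvBFold q0 qr qp (c :: cs) (s, b0, b1, b2)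
            = pvBFold q0 qr qp cs (PySem.Set.add s c, b0 ++ [c], b1, b2) := by
          show pvBFold q0 qr qp cs (if PySem.Set.contains s c then _ else _) = _
          rw [hs c, hsc']
          simp [h0c]
        rw [hstep]
        obtain ⟨h0, h1, h2⟩ := ih (PySem.Set.add s c) (pvIns c sf) (b0 ++ [c]) b1 b2 hins
        rw [hfd]
        refine ⟨?_, ?_, ?_⟩
        · rw [h0, List.filter_cons_of_pos h0c, List.append_assoc, List.singleton_append]
        · rw [h1, List.filter_cons_of_neg (by simp [h0c])]
        · rw [h2, List.filter_cons_of_neg (by simp [h0c])]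
      · have h0c' : q0 c = false := by simp [h0c]
        by_cases hrc : qr c = true
        · have hstep : pvBFold q0 qr qp (c :: cs) (s, b0, b1, b2)
              = pvBFold q0 qr qp cs (PySem.Set.add s c, b0, b1 ++ [c], b2) := by
            show pvBFold q0 qr qp cs (if PySem.Set.contains s c then _ else _) = _
            rw [hs c, hsc']
            simp [h0c', hrc]
          rw [hstep]
          obtain ⟨h0, h1, h2⟩ := ih (PySem.Set.add s c) (pvIns c sf) b0 (b1 ++ [c]) b2 hins
          rw [hfd]
          refine ⟨?_, ?_, ?_⟩
          · rw [h0, List.filter_cons_of_neg (by simp [h0c'])]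
          · rw [h1, List.filter_cons_of_pos (by simp [h0c', hrc]),
              List.append_assoc, List.singleton_append]
          · rw [h2, List.filter_cons_of_neg (by simp [hrc])]
        · have hrc' : qr c = false := by simp [hrc]
          by_cases hpc : qp c = true
          · have hstep : pvBFold q0 qr qp (c :: cs) (s, b0, b1, b2)
                = pvBFold q0 qr qp cs (PySem.Set.add s c, b0, b1, b2 ++ [c]) := by
              show pvBFold q0 qr qp cs (if PySem.Set.contains s c then _ else _) = _
              rw [hs c, hsc']
              simp [h0c', hrc', hpc]
            rw [hstep]
            obtain ⟨h0, h1, h2⟩ := ih (PySem.Set.add s c) (pvIns c sf) b0 b1 (b2 ++ [c]) hins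
            rw [hfd]
            refine ⟨?_, ?_, ?_⟩
            · rw [h0, List.filter_cons_of_neg (by simp [h0c'])]
            · rw [h1, List.filter_cons_of_neg (by simp [h0c', hrc'])]
            · rw [h2, List.filter_cons_of_pos (by simp [h0c', hrc', hpc]),
                List.append_assoc, List.singleton_append]
          · have hpc' : qp c = false := by simp [hpc]
            have hstep : pvBFold q0 qr qp (c :: cs) (s, b0, b1, b2)
                = pvBFold q0 qr qp cs (PySem.Set.add s c, b0, b1, b2) := by
              show pvBFold q0 qr qp cs (if PySem.Set.contains s c then _ else _) = _
              rw [hs c, hsc']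
              simp [h0c', hrc', hpc']
            rw [hstep]
            obtain ⟨h0, h1, h2⟩ := ih (PySem.Set.add s c) (pvIns c sf) b0 b1 b2 hins
            rw [hfd]
            refine ⟨?_, ?_, ?_⟩
            · rw [h0, List.filter_cons_of_neg (by simp [h0c'])]
            · rw [h1, List.filter_cons_of_neg (by simp [h0c', hrc'])]
            · rw [h2, List.filter_cons_of_neg (by simp [h0c', hrc', hpc'])]

-- membership function of A's seen set after the preferred phase
def pvSF1 (preferred : Option String) (columns : List String) : String → Bool :=
  fun x =>
    match preferred with
    | some p => p != "" && columns.contains p && x == p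
    | none => false

-- the bridge: keeping the preferred column out of the seen set, then filtering, equals
-- filtering the full dedup by "not the preferred"
theorem filter_pvFD_sf1 (preferred : Option String) (cols : List String) (h : String → Bool) :
    (pvFD (pvSF1 preferred cols) cols).filter h
      = (pvFD (fun _ => false) cols).filter (fun x => !pvPrefHit preferred x && h x) := by
  cases preferred with
  | none =>
    have h1 : pvSF1 none cols = fun _ => false := by funext x; simp [pvSF1]
    rw [h1]
    apply List.filter_congr
    intro x _
    simp [pvPrefHit]
  | some p =>
    by_cases hp : (p != "") = true
    · by_cases hm : cols.contains p = true
      · have hm' : p ∈ cols := by simpa using hm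
        have h1 : pvSF1 (some p) cols = fun x => (fun _ => false) x || (x == p) := by
          funext x; simp [pvSF1, hp, hm']
        rw [h1, filter_pvFD_or]
        apply List.filter_congr
        intro x _
        simp [pvPrefHit, hp]
      · have hm' : p ∉ cols := by simpa using hm
        have h1 : pvSF1 (some p) cols = fun _ => false := by
          funext x; simp [pvSF1, hm']
        rw [h1]
        apply List.filter_congr
        intro x hx
        have hxc : x ∈ cols := ((mem_pvFD x cols _).mp hx).1
        have hxp : x ≠ p := by
          intro he; subst he; exact hm (by simpa using hxc)
        simp [pvPrefHit, hxp]
    · have hp' : p = "" := by simpa using hp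
      have h1 : pvSF1 (some p) cols = fun _ => false := by
        funext x; simp [pvSF1, hp']
      rw [h1]
      apply List.filter_congr
      intro x _
      simp [pvPrefHit, hp']

-- the preferred bucket of A's phase-1 equals B's first bucket
theorem pref_bucket (preferred : Option String) (cols : List String) :
    (match preferred with
     | none => ([] : List String)
     | some p => if p != "" && cols.contains p then [p] else [])
      = (pvFD (fun _ => false) cols).filter (pvPrefHit preferred) := by
  cases preferred with
  | none =>
    symm
    rw [List.filter_eq_nil_iff]
    intro x _
    simp [pvPrefHit]
  | some p =>
    show (if (p != "" && cols.contains p) = true then [p] else [])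
        = (pvFD (fun _ => false) cols).filter (pvPrefHit (some p))
    by_cases hp : (p != "") = true
    · by_cases hm : cols.contains p = true
      · rw [if_pos (by rw [hp, hm]; rfl)]
        have h1 : (pvFD (fun _ => false) cols).filter (pvPrefHit (some p))
            = (pvFD (fun _ => false) cols).filter (· == p) := by
          apply List.filter_congr
          intro x _
          simp [pvPrefHit, hp]
        rw [h1, List.filter_beq,
          List.count_eq_one_of_mem (nodup_pvFD cols _)
            ((mem_pvFD p cols _).mpr ⟨by simpa using hm, rfl⟩)]
        rfl
      · have hmf : cols.contains p = false := by
          cases hcp : cols.contains p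
          · rfl
          · exact absurd hcp hm
        rw [if_neg (by rw [hp, hmf]; simp)]
        symm
        rw [List.filter_eq_nil_iff]
        intro x hx
        have hxc : x ∈ cols := ((mem_pvFD x cols _).mp hx).1
        have hxp : x ≠ p := by
          intro he; subst he; exact hm (by simpa using hxc)
        simp [pvPrefHit, hxp]
    · have hp' : p = "" := by simpa using hp
      rw [if_neg (by simp [hp'])]
      symm
      rw [List.filter_eq_nil_iff]
      intro x _
      simp [pvPrefHit, hp']

-- membership of A's phase-1 seen set
theorem st0_contains (preferred : Option String) (cols : List String) :
    ∀ x, PySem.Set.contains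
      (match preferred with
       | none => ((PySem.Set.empty : PySem.Set String), ([] : List String))
       | some p => if p != "" && cols.contains p
           then (PySem.Set.add PySem.Set.empty p, [p])
           else (PySem.Set.empty, [])).1 x = pvSF1 preferred cols x := by
  intro x
  cases preferred with
  | none => simp [PySem.Set.empty, pvSF1]
  | some p =>
    show PySem.Set.contains
      (if (p != "" && cols.contains p) = true
       then (PySem.Set.add PySem.Set.empty p, [p])
       else ((PySem.Set.empty : PySem.Set String), ([] : List String))).1 x = pvSF1 (some p) cols x
    by_cases hc : (p != "" && cols.contains p) = true
    · rw [if_pos hc]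
      simp only [Bool.and_eq_true] at hc
      have hm' : p ∈ cols := by simpa using hc.2
      rw [contains_pvAdd]
      simp [PySem.Set.empty, pvSF1, hc.1, hm']
    · rw [if_neg hc]
      by_cases hp : (p != "") = true
      · have hb : cols.contains p = false := by
          cases hcp : cols.contains p
          · rfl
          · exact absurd (by rw [hp, hcp]; rfl) hc
        have hb' : p ∉ cols := by simpa using hb
        simp [PySem.Set.empty, pvSF1, hp, hb']
      · have hp' : p = "" := by simpa using hp
        simp [PySem.Set.empty, pvSF1, hp']

theorem candidate_columns_AB (preferred : Option String) (columns : List String)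
    (role_by_name : List (String × String)) (roles : List String)
    (patterns : List String) (lower_names : List (String × String)) :
    candidate_columns_py preferred columns role_by_name roles patterns lower_names
      = candidate_columns_py_alt preferred columns role_by_name roles patterns lower_names := by
  set st0 : PySem.Set String × List String :=
    (match preferred with
     | none => ((PySem.Set.empty : PySem.Set String), ([] : List String))
     | some p => if p != "" && columns.contains p
         then (PySem.Set.add PySem.Set.empty p, [p])
         else (PySem.Set.empty, [])) with hst0
  have hA : candidate_columns_py preferred columns role_by_name roles patterns lower_names
      = (pvPatFold (pvPatHit lower_names patterns) columns
          (pvRoleFold (pvRoleHit role_by_name roles) columns st0)).2 := rfl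
  have hB : candidate_columns_py_alt preferred columns role_by_name roles patterns lower_names
      = (pvBFold (pvPrefHit preferred) (pvRoleHit role_by_name roles)
          (pvPatHit lower_names patterns) columns (PySem.Set.empty, [], [], [])).2.1
        ++ (pvBFold (pvPrefHit preferred) (pvRoleHit role_by_name roles)
          (pvPatHit lower_names patterns) columns (PySem.Set.empty, [], [], [])).2.2.1
        ++ (pvBFold (pvPrefHit preferred) (pvRoleHit role_by_name roles)
          (pvPatHit lower_names patterns) columns (PySem.Set.empty, [], [], [])).2.2.2 := rfl
  -- B's three buckets
  obtain ⟨hb0, hb1, hb2⟩ := pvBFold_spec (pvPrefHit preferred) (pvRoleHit role_by_name roles)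
    (pvPatHit lower_names patterns) columns PySem.Set.empty (fun _ => false) [] [] []
    (fun x => by simp [PySem.Set.empty])
  -- A's phase 1
  have hs0 : ∀ x, PySem.Set.contains st0.1 x = pvSF1 preferred columns x := by
    rw [hst0]; exact st0_contains preferred columns
  have hsnd0 : st0.2 = (pvFD (fun _ => false) columns).filter (pvPrefHit preferred) := by
    rw [hst0, ← pref_bucket preferred columns]
    cases preferred with
    | none => rfl
    | some p =>
      show (if (p != "" && columns.contains p) = true
            then (PySem.Set.add PySem.Set.empty p, [p])
            else ((PySem.Set.empty : PySem.Set String), ([] : List String))).2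
          = (if (p != "" && columns.contains p) = true then [p] else [])
      split <;> rfl
  -- A's phase 2
  obtain ⟨hr2, hr1⟩ := pvRoleFold_spec (pvRoleHit role_by_name roles) columns st0.1
    (pvSF1 preferred columns) st0.2 hs0
  -- A's phase 3
  have hp2 := pvPatFold_spec (pvPatHit lower_names patterns) columns
    (pvRoleFold (pvRoleHit role_by_name roles) columns st0).1
    (fun x => pvSF1 preferred columns x || (pvRoleHit role_by_name roles x && columns.contains x))
    (pvRoleFold (pvRoleHit role_by_name roles) columns st0).2 hr1
  rw [hA, hB]
  rw [Prod.mk.eta] at hr2 hr1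
  rw [Prod.mk.eta] at hp2
  rw [hp2, hr2, hsnd0]
  -- normalize the third-pass seen set down to the empty-seen dedup
  have hcong : pvFD (fun x => pvSF1 preferred columns x
        || (pvRoleHit role_by_name roles x && columns.contains x)) columns
      = pvFD (fun x => pvSF1 preferred columns x || pvRoleHit role_by_name roles x) columns := by
    apply pvFD_congr
    intro x hx
    simp [hx]
  rw [hcong, filter_pvFD_or, filter_pvFD_sf1, filter_pvFD_sf1, hb0, hb1, hb2]
  simp [List.append_assoc]

-- ===== VERDICT (by name: the statement is the Claim_ definition above) =====
theorem candidate_columns_py_spec : Claim_equal_candidate_columns_py := by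
  intro preferred columns role_by_name roles patterns lower_names _ _
  unfold Spec_candidate_columns_py
  exact candidate_columns_AB preferred columns role_by_name roles patterns lower_names
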